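-- pv_equiv track=rewrite | github.com/trungdangtapcode/crm-mcp-ai-agent | test/mcp_client_pydantic_fixed.py | _infer_tool_category
-- ===== SOURCE A (Python) =====
-- def _infer_tool_category(tool_name: str) -> str:
--     """Infer the category of a tool based on its name"""
--     name_lower = tool_name.lower()
--
--     if any(keyword in name_lower for keyword in ["time", "date", "clock", "calendar"]):
--         return "time"
--     elif any(keyword in name_lower for keyword in ["weather", "forecast", "temperature", "climate"]):
--         return "weather"
--     elif any(keyword in name_lower for keyword in ["search", "web", "find", "lookup", "query", "fetch"]):
--         return "search"
--     elif any(keyword in name_lower for keyword in ["memory", "remember", "recall", "store"]):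
--         return "memory"
--     elif any(keyword in name_lower for keyword in ["plan", "task", "schedule", "goal"]):
--         return "planning"
--     elif any(keyword in name_lower for keyword in ["calculate", "math", "compute", "convert"]):
--         return "calculation"
--     elif any(keyword in name_lower for keyword in ["customer", "crm", "client"]):
--         return "crm"
--     else:
--         return "general"
-- ===== SOURCE B (Python) =====
-- # Min-rank selection: scan one flat keyword->rank map, take the best (lowest)
-- # rank among ALL matching keywords, then index the category list.
-- _KEYWORD_RANK = {
--     "time": 0, "date": 0, "clock": 0, "calendar": 0,
--     "weather": 1, "forecast": 1, "temperature": 1, "climate": 1,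
--     "search": 2, "web": 2, "find": 2, "lookup": 2, "query": 2, "fetch": 2,
--     "memory": 3, "remember": 3, "recall": 3, "store": 3,
--     "plan": 4, "task": 4, "schedule": 4, "goal": 4,
--     "calculate": 5, "math": 5, "compute": 5, "convert": 5,
--     "customer": 6, "crm": 6, "client": 6,
-- }
-- _CATEGORIES = ["time", "weather", "search", "memory", "planning",
--                "calculation", "crm", "general"]
--
--
-- def _infer_tool_category(tool_name: str) -> str:
--     """Infer the category of a tool based on its name"""
--     name_lower = tool_name.lower()
--     best = min((rank for kw, rank in _KEYWORD_RANK.items() if kw in name_lower),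
--                default=len(_CATEGORIES) - 1)
--     return _CATEGORIES[best]
-- ===== Notes on version B (the rewrite author's own statement) =====
-- stated objective: alternative
-- what changed: Instead of an ordered first-match if-elif chain, B scans one flat keyword-to-priority-rank map, computes the minimum rank over ALL matching keywords, and indexes a category array by that rank (the chain's priority becomes an arithmetic min).
import Mathlib
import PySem

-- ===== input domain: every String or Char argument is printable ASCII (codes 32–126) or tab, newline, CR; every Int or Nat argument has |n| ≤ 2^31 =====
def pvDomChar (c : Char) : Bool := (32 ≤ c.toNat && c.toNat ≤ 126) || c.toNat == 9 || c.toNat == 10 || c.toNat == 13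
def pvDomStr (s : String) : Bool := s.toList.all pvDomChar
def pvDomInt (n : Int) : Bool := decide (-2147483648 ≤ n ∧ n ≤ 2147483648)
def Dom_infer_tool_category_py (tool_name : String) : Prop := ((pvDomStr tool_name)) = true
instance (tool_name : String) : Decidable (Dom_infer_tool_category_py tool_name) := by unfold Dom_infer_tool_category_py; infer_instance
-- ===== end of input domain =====

-- B replaces A's first-match if-elif chain by a min-rank selection over a flat keyword→rank map (alternative algorithm, same cost).

-- ===== PORT A =====
def infer_tool_category_py (tool_name : String) : String :=
  let name_lower := PySem.Str.lower tool_name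
  if ["time", "date", "clock", "calendar"].any (fun k => PySem.Str.isIn k name_lower) then "time"
  else if ["weather", "forecast", "temperature", "climate"].any (fun k => PySem.Str.isIn k name_lower) then "weather"
  else if ["search", "web", "find", "lookup", "query", "fetch"].any (fun k => PySem.Str.isIn k name_lower) then "search"
  else if ["memory", "remember", "recall", "store"].any (fun k => PySem.Str.isIn k name_lower) then "memory"
  else if ["plan", "task", "schedule", "goal"].any (fun k => PySem.Str.isIn k name_lower) then "planning"
  else if ["calculate", "math", "compute", "convert"].any (fun k => PySem.Str.isIn k name_lower) then "calculation"
  else if ["customer", "crm", "client"].any (fun k => PySem.Str.isIn k name_lower) then "crm"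
  else "general"

-- ===== PORT B =====
def pvKeywordRank : List (String × Nat) :=
  [("time", 0), ("date", 0), ("clock", 0), ("calendar", 0),
   ("weather", 1), ("forecast", 1), ("temperature", 1), ("climate", 1),
   ("search", 2), ("web", 2), ("find", 2), ("lookup", 2), ("query", 2), ("fetch", 2),
   ("memory", 3), ("remember", 3), ("recall", 3), ("store", 3),
   ("plan", 4), ("task", 4), ("schedule", 4), ("goal", 4),
   ("calculate", 5), ("math", 5), ("compute", 5), ("convert", 5),
   ("customer", 6), ("crm", 6), ("client", 6)]

def pvCategories : List String :=
  ["time", "weather", "search", "memory", "planning", "calculation", "crm", "general"]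

-- min over the ranks of matching keywords, default = last index (7)
def infer_tool_category_py_alt (tool_name : String) : String :=
  let name_lower := PySem.Str.lower tool_name
  let best := pvKeywordRank.foldl
    (fun acc p => if PySem.Str.isIn p.1 name_lower then min acc p.2 else acc)
    (pvCategories.length - 1)
  pvCategories.getD best "general"

-- ===== PRECONDITION & SPEC =====
def Spec_infer_tool_category_py (tool_name : String) (out : String) : Prop := out = infer_tool_category_py_alt tool_name
instance (tool_name : String) (out : String) : Decidable (Spec_infer_tool_category_py tool_name out) := by unfold Spec_infer_tool_category_py; infer_instance

-- ===== CLAIM (what is proved, stated in full; the proofs are below) =====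
def Claim_equal_infer_tool_category_py : Prop := ∀ (tool_name : String), Dom_infer_tool_category_py tool_name → Spec_infer_tool_category_py tool_name (infer_tool_category_py tool_name)

-- ===== LEMMAS AND PROOFS =====

-- folding one rank-r group of keywords: min with r iff some keyword matches
theorem pv_group_fold (kws : List String) (r : Nat) (nl : String) (a : Nat) :
    List.foldl (fun acc kw => if PySem.Str.isIn kw nl then min acc r else acc) a kws
      = if kws.any (fun k => PySem.Str.isIn k nl) then min a r else a := by
  induction kws generalizing a with
  | nil => simp only [List.foldl_nil, List.any_nil, Bool.false_eq_true, if_false]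
  | cons k rest ih =>
    simp only [List.foldl_cons, List.any_cons]
    by_cases h : PySem.Str.isIn k nl = true
    · rw [if_pos h]
      simp only [h, Bool.true_or, if_true, ih]
      split_ifs with hh
      · rw [Nat.min_assoc, Nat.min_self]
      · rfl
    · have hf : PySem.Str.isIn k nl = false := by rwa [Bool.not_eq_true] at h
      rw [if_neg h]
      simp only [hf, Bool.false_or, ih]

theorem pv_flat_split :
    pvKeywordRank
      = (["time", "date", "clock", "calendar"].map (fun k => (k, 0)))
        ++ (["weather", "forecast", "temperature", "climate"].map (fun k => (k, 1)))
        ++ (["search", "web", "find", "lookup", "query", "fetch"].map (fun k => (k, 2)))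
        ++ (["memory", "remember", "recall", "store"].map (fun k => (k, 3)))
        ++ (["plan", "task", "schedule", "goal"].map (fun k => (k, 4)))
        ++ (["calculate", "math", "compute", "convert"].map (fun k => (k, 5)))
        ++ (["customer", "crm", "client"].map (fun k => (k, 6))) := rfl

-- both ports, written out over an arbitrary lowered name
theorem pv_main (nl : String) :
    (if ["time", "date", "clock", "calendar"].any (fun k => PySem.Str.isIn k nl) then "time"
     else if ["weather", "forecast", "temperature", "climate"].any (fun k => PySem.Str.isIn k nl) then "weather"
     else if ["search", "web", "find", "lookup", "query", "fetch"].any (fun k => PySem.Str.isIn k nl) then "search"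
     else if ["memory", "remember", "recall", "store"].any (fun k => PySem.Str.isIn k nl) then "memory"
     else if ["plan", "task", "schedule", "goal"].any (fun k => PySem.Str.isIn k nl) then "planning"
     else if ["calculate", "math", "compute", "convert"].any (fun k => PySem.Str.isIn k nl) then "calculation"
     else if ["customer", "crm", "client"].any (fun k => PySem.Str.isIn k nl) then "crm"
     else "general")
      = pvCategories.getD
          (pvKeywordRank.foldl
            (fun acc p => if PySem.Str.isIn p.1 nl then min acc p.2 else acc)
            (pvCategories.length - 1)) "general" := by
  rw [pv_flat_split]
  simp only [List.foldl_append, List.foldl_map]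
  rw [pv_group_fold, pv_group_fold, pv_group_fold, pv_group_fold, pv_group_fold,
      pv_group_fold, pv_group_fold]
  split_ifs <;> rfl

-- ===== VERDICT (by name: the statement is the Claim_ definition above) =====
theorem infer_tool_category_py_spec : Claim_equal_infer_tool_category_py := by
  intro tool_name _
  exact pv_main (PySem.Str.lower tool_name)
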